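-- pv_equiv track=rewrite | github.com/rh-ai-quickstart/ai-observability-summarizer | src/core/catalog_validator.py | _categorize_new_metric
-- ===== SOURCE A (Python) =====
-- from typing import Dict, List, Optional, Set, Tuple
--
-- def _categorize_new_metric(
--
--     name: str,
--     prefix_map: Dict[str, str],
-- ) -> Optional[str]:
--     """
--     Categorize a new metric using longest-prefix-match.
--
--     Tries 4-segment prefix first, then 3, 2, 1.
--
--     Args:
--         name: Metric name.
--         prefix_map: Prefix-to-category_id map.
--
--     Returns:
--         category_id or None if no match.
--     """
--     parts = name.split("_")
--     # Try longest prefix first (4 -> 3 -> 2 -> 1)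
--     for depth in range(min(4, len(parts)), 0, -1):
--         prefix = "_".join(parts[:depth])
--         if prefix in prefix_map:
--             return prefix_map[prefix]
--     return None
-- ===== SOURCE B (Python) =====
-- def _categorize_new_metric(name, prefix_map):
--     """Ascending scan: grow the prefix one segment at a time (up to 4) and
--     keep the category of the last (= longest) prefix found in the map."""
--     parts = name.split("_")
--     prefix = parts[0]
--     result = prefix_map.get(prefix)
--     for part in parts[1:4]:
--         prefix = prefix + "_" + part
--         if prefix in prefix_map:
--             result = prefix_map[prefix]
--     return result
-- ===== Notes on version B (the rewrite author's own statement) =====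
-- stated objective: alternative
-- what changed: Replaced the longest-first descending scan that re-joins parts[:depth] on every iteration and early-returns with a single ascending pass that grows the prefix incrementally by string concatenation and keeps the category of the last (longest) prefix found in the map.
import Mathlib
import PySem

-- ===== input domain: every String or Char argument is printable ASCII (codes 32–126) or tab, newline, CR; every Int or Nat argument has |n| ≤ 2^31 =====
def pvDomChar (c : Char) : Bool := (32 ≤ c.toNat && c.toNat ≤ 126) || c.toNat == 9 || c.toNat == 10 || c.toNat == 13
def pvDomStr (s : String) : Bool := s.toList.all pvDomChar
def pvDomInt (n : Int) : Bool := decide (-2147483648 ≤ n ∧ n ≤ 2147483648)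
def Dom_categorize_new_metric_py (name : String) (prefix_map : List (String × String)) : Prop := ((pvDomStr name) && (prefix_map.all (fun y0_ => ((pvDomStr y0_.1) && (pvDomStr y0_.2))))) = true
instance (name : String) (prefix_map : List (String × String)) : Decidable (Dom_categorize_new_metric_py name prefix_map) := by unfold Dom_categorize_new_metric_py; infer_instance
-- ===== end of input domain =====

-- B replaces A's longest-first scan (re-joining a slice per depth) by one ascending
-- pass that grows the prefix incrementally and keeps the last (= longest) match;
-- objective: alternative decomposition, same cost.

-- Python dict membership + subscript / .get on an insertion-ordered map: first match.
def pyDictGet? (m : List (String × String)) (k : String) : Option String :=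
  (m.find? (fun kv => kv.1 == k)).map (·.2)

-- ===== PORT A =====
-- A's loop `for depth in range(min(4,len(parts)), 0, -1)`: depth counts down, each
-- iteration re-joins parts[:depth]; early return on the first (deepest) hit.
def goA (m : List (String × String)) (parts : List String) : Nat → Option String
  | 0 => none
  | d + 1 =>
    match pyDictGet? m (PySem.Str.join "_" (parts.take (d + 1))) with
    | some v => some v
    | none => goA m parts d

def categorize_new_metric_py (name : String) (prefix_map : List (String × String)) : Option String :=
  let parts := (PySem.Str.split? name "_").getD []   -- sep "_" ≠ "": split? is always some
  goA prefix_map parts (min 4 parts.length)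

-- ===== PORT B =====
-- B's loop `for part in parts[1:4]`: grow the prefix, overwrite result on each hit.
def goB (m : List (String × String)) : List String → String → Option String → Option String
  | [], _, res => res
  | p :: rest, pre, res =>
    let pre' := pre ++ "_" ++ p
    goB m rest pre' (match pyDictGet? m pre' with | some v => some v | none => res)

def categorize_new_metric_py_alt (name : String) (prefix_map : List (String × String)) : Option String :=
  let parts := (PySem.Str.split? name "_").getD []   -- sep "_" ≠ "": split? is always some
  match parts with
  | [] => none   -- unreachable: split? never yields an empty list
  | p :: rest => goB prefix_map (rest.take 3) p (pyDictGet? prefix_map p)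

-- ===== PRECONDITION & SPEC =====
def Spec_categorize_new_metric_py (name : String) (prefix_map : List (String × String)) (out : Option String) : Prop := out = categorize_new_metric_py_alt name prefix_map
instance (name : String) (prefix_map : List (String × String)) (out : Option String) : Decidable (Spec_categorize_new_metric_py name prefix_map out) := by unfold Spec_categorize_new_metric_py; infer_instance

-- ===== CLAIM (what is proved, stated in full; the proofs are below) =====
def Claim_equal_categorize_new_metric_py : Prop := ∀ (name : String) (prefix_map : List (String × String)), Dom_categorize_new_metric_py name prefix_map → Spec_categorize_new_metric_py name prefix_map (categorize_new_metric_py name prefix_map)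

-- ===== LEMMAS AND PROOFS =====

theorem join_singleton' (p : String) : PySem.Str.join "_" [p] = p := by
  apply String.toList_inj.mp; simp [PySem.Chars.join_singleton]

theorem join_cons_cons' (p q : String) (l : List String) :
    PySem.Str.join "_" (p :: q :: l) = PySem.Str.join "_" ((p ++ "_" ++ q) :: l) := by
  apply String.toList_inj.mp
  cases l <;> simp [PySem.Chars.join_singleton, PySem.Chars.join_cons_cons]

theorem join_eq_foldl (l : List String) (p : String) :
    PySem.Str.join "_" (p :: l) = l.foldl (fun a b => a ++ "_" ++ b) p := by
  induction l generalizing p with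
  | nil => exact join_singleton' p
  | cons q l ih => rw [List.foldl_cons, join_cons_cons', ih]

theorem goB_append (m : List (String × String)) (ps : List String) (q pre : String)
    (res : Option String) :
    goB m (ps ++ [q]) pre res =
      match pyDictGet? m (ps.foldl (fun a b => a ++ "_" ++ b) pre ++ "_" ++ q) with
      | some v => some v
      | none => goB m ps pre res := by
  induction ps generalizing pre res with
  | nil => rfl
  | cons a ps ih => simpa [goB] using ih (pre ++ "_" ++ a) _

theorem goA_eq_goB (m : List (String × String)) (p : String) (rest : List String)
    (d : Nat) (hd : d ≤ rest.length) :
    goA m (p :: rest) (d + 1) = goB m (rest.take d) p (pyDictGet? m p) := by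
  induction d with
  | zero =>
    show (match pyDictGet? m (PySem.Str.join "_" ((p :: rest).take 1)) with
          | some v => some v | none => goA m (p :: rest) 0) = _
    rw [show (p :: rest).take 1 = [p] by simp, join_singleton']
    cases pyDictGet? m p <;> rfl
  | succ d ih =>
    have hdlt : d < rest.length := hd
    have htake : rest.take (d + 1) = rest.take d ++ [rest[d]] := by
      rw [← List.take_concat_get (l := rest) (h := hdlt), List.concat_eq_append]
    have hjoin : PySem.Str.join "_" ((p :: rest).take (d + 2)) =
        (rest.take d).foldl (fun a b => a ++ "_" ++ b) p ++ "_" ++ rest[d] := by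
      rw [show (p :: rest).take (d + 2) = p :: rest.take (d + 1) from rfl, htake, join_eq_foldl, List.foldl_append, List.foldl_cons,
        List.foldl_nil]
    show (match pyDictGet? m (PySem.Str.join "_" ((p :: rest).take (d + 2))) with
          | some v => some v | none => goA m (p :: rest) (d + 1)) = _
    rw [hjoin, htake, goB_append, ih (Nat.le_of_lt hdlt)]

theorem take_three (rest : List String) : rest.take (min 3 rest.length) = rest.take 3 := by
  rcases Nat.le_total 3 rest.length with h | h
  · rw [Nat.min_eq_left h]
  · rw [Nat.min_eq_right h, List.take_of_length_le h, List.take_of_length_le (by omega)]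

-- ===== VERDICT (by name: the statement is the Claim_ definition above) =====
theorem categorize_new_metric_py_spec : Claim_equal_categorize_new_metric_py := by
  intro name prefix_map _
  unfold Spec_categorize_new_metric_py categorize_new_metric_py categorize_new_metric_py_alt
  cases hp : (PySem.Str.split? name "_").getD [] with
  | nil => rfl
  | cons p rest =>
    show goA prefix_map (p :: rest) (min 4 (rest.length + 1)) = _
    rw [show min 4 (rest.length + 1) = min 3 rest.length + 1 by omega,
      goA_eq_goB prefix_map p rest _ (Nat.min_le_right 3 rest.length), take_three]
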